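-- pv_equiv track=rewrite | github.com/TrialAndErrror/netflix_research_utils | src/unogs/process_results.py | format_by_country
-- ===== SOURCE A (Python) =====
-- def format_by_country(all_results):
--     total_dict = {}
--
--     for results_dict in all_results:
--         for country, c_value in results_dict.items():
--
--             if not country in total_dict:
--                 total_dict[country] = {}
--
--             for sub_or_dub, s_value in c_value.items():
--                 if not sub_or_dub in total_dict[country]:
--                     total_dict[country][sub_or_dub] = {}
--
--                 for language, l_value in s_value.items():
--                     if not language in total_dict[country][sub_or_dub]:
--                         total_dict[country][sub_or_dub][language] = []
--                     total_dict[country][sub_or_dub][language].extend(l_value)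
--
--     return total_dict
-- ===== SOURCE B (Python) =====
-- from functools import reduce
--
--
-- def _merge(dst, src):
--     """Recursively merge src into dst: nested dicts merge, leaf lists concatenate."""
--     for key, value in src.items():
--         if isinstance(value, dict):
--             _merge(dst.setdefault(key, {}), value)
--         else:
--             dst.setdefault(key, []).extend(value)
--     return dst
--
--
-- def format_by_country(all_results):
--     return reduce(_merge, all_results, {})
-- ===== Notes on version B (the rewrite author's own statement) =====
-- stated objective: idiomatic
-- what changed: A's three fixed nested loops with explicit membership tests and empty-dict/list initialisation are replaced by one generic recursive merge helper (setdefault + recurse on dicts, extend on lists) folded over the input with functools.reduce.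
import Mathlib
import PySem

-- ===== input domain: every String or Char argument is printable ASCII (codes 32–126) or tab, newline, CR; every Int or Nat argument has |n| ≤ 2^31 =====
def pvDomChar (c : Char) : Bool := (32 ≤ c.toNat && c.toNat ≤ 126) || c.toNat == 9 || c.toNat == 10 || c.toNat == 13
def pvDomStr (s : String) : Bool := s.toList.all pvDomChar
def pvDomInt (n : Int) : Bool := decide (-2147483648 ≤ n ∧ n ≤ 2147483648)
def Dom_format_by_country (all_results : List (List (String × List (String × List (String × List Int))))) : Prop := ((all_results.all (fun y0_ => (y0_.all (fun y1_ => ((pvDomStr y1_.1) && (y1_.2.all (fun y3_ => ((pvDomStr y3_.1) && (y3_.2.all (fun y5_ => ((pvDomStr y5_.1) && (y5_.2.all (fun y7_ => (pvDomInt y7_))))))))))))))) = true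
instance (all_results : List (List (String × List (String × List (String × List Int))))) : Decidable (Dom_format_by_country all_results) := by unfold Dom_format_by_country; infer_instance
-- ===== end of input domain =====

-- B replaces A's three fixed nested loops (membership test + empty-init + extend at the leaves) by a single
-- generic recursive merge helper folded over the input with functools.reduce (objective: idiomatic).
-- Neither version mutates its argument; the equivalence is about the returned nested dict.

-- Nested dict types used internally by both ports (dict → insertion-ordered PySem.Dict; returned as assoc lists).
abbrev PvD1 := PySem.Dict String (List Int)
abbrev PvD2 := PySem.Dict String PvD1
abbrev PvD3 := PySem.Dict String PvD2

-- ===== PORT A =====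
-- innermost loop body: `if not language in total[c][s]: total[c][s][language] = []` then `.extend(l_value)`
def aStep3 (c s : String) (t : PvD3) (p : String × List Int) : PvD3 :=
  let t' := if ((t.getD c PySem.Dict.empty).getD s PySem.Dict.empty).contains p.1 = false then
      t.modify c PySem.Dict.empty (fun dc => dc.modify s PySem.Dict.empty (fun ds => ds.insert p.1 []))
    else t
  t'.modify c PySem.Dict.empty (fun dc => dc.modify s PySem.Dict.empty (fun ds => ds.modify p.1 [] (· ++ p.2)))

-- middle loop body: `if not sub_or_dub in total[c]: total[c][sub_or_dub] = {}` then the language loop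
def aStep2 (c : String) (t : PvD3) (p : String × List (String × List Int)) : PvD3 :=
  let t' := if (t.getD c PySem.Dict.empty).contains p.1 = false then
      t.modify c PySem.Dict.empty (fun dc => dc.insert p.1 PySem.Dict.empty)
    else t
  p.2.foldl (aStep3 c p.1) t'

-- outer loop body: `if not country in total: total[country] = {}` then the sub/dub loop
def aStep1 (t : PvD3) (p : String × List (String × List (String × List Int))) : PvD3 :=
  let t' := if t.contains p.1 = false then t.insert p.1 PySem.Dict.empty else t
  p.2.foldl (aStep2 p.1) t'

def format_by_country (all_results : List (List (String × List (String × List (String × List Int))))) : List (String × List (String × List (String × List Int))) :=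
  let total := all_results.foldl (fun t rd => rd.foldl aStep1 t) PySem.Dict.empty
  total.items.map (fun q => (q.1, q.2.items.map (fun r => (r.1, r.2.items))))

-- ===== PORT B =====
-- _merge at the leaf level: `dst.setdefault(k, []).extend(v)`  (dst[k] = dst.get(k, []) + v)
def bMerge1 (dst : PvD1) (src : List (String × List Int)) : PvD1 :=
  src.foldl (fun d p => d.modify p.1 [] (· ++ p.2)) dst

-- _merge one level up: `_merge(dst.setdefault(k, {}), v)`
def bMerge2 (dst : PvD2) (src : List (String × List (String × List Int))) : PvD2 :=
  src.foldl (fun d p => d.modify p.1 PySem.Dict.empty (fun sub => bMerge1 sub p.2)) dst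

def bMerge3 (dst : PvD3) (src : List (String × List (String × List (String × List Int)))) : PvD3 :=
  src.foldl (fun d p => d.modify p.1 PySem.Dict.empty (fun sub => bMerge2 sub p.2)) dst

-- reduce(_merge, all_results, {})
def format_by_country_alt (all_results : List (List (String × List (String × List (String × List Int))))) : List (String × List (String × List (String × List Int))) :=
  let total := all_results.foldl bMerge3 PySem.Dict.empty
  total.items.map (fun q => (q.1, q.2.items.map (fun r => (r.1, r.2.items))))

-- ===== PRECONDITION & SPEC =====
def Spec_format_by_country (all_results : List (List (String × List (String × List (String × List Int))))) (out : List (String × List (String × List (String × List Int)))) : Prop := out = format_by_country_alt all_results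
instance (all_results : List (List (String × List (String × List (String × List Int))))) (out : List (String × List (String × List (String × List Int)))) : Decidable (Spec_format_by_country all_results out) := by
  unfold Spec_format_by_country
  have d1 : DecidableEq (List (String × List Int)) := inferInstance
  have d2 : DecidableEq (List (String × List (String × List Int))) := inferInstance
  infer_instance

-- ===== CLAIM (what is proved, stated in full; the proofs are below) =====
def Claim_equal_format_by_country : Prop := ∀ (all_results : List (List (String × List (String × List (String × List Int))))), Dom_format_by_country all_results → Spec_format_by_country all_results (format_by_country all_results)

-- ===== LEMMAS AND PROOFS =====

-- generic dict facts (modify is insert of the updated value; these are the update algebra the proof runs on)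
theorem pv_dict_insert_self {κ ν : Type} [BEq κ] [LawfulBEq κ] (d : PySem.Dict κ ν) {k : κ} {v : ν}
    (h : d.get? k = some v) (hn : d.keys.Nodup) : d.insert k v = d := by
  have hc : d.contains k = true := by rw [PySem.Dict.contains_eq_isSome_get?, h]; rfl
  apply PySem.Dict.ext
  rw [PySem.Dict.items_insert_of_contains d v hc]
  conv_rhs => rw [← List.map_id d.items]
  apply List.map_congr_left
  intro p hp
  obtain ⟨p1, p2⟩ := p
  by_cases hk : p1 = k
  · have hg : d.get? p1 = some p2 := PySem.Dict.get?_of_mem_items d hp hn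
    rw [hk, h] at hg
    simp [hk, Option.some_inj.mp hg]
  · simp [hk]

theorem pv_dict_modify_id {κ ν : Type} [BEq κ] [LawfulBEq κ] (d : PySem.Dict κ ν) (k : κ) (d0 : ν)
    (hc : d.contains k = true) (hn : d.keys.Nodup) : d.modify k d0 (fun v => v) = d := by
  have hsome : (d.get? k).isSome = true := by rw [← PySem.Dict.contains_eq_isSome_get?]; exact hc
  obtain ⟨v, hv⟩ := Option.isSome_iff_exists.mp hsome
  show d.insert k ((fun v => v) (d.getD k d0)) = d
  rw [PySem.Dict.getD_of_get?_eq_some d d0 hv]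
  exact pv_dict_insert_self d hv hn

theorem pv_modify_modify {κ ν : Type} [BEq κ] [LawfulBEq κ] (d : PySem.Dict κ ν) (k : κ) (d0 : ν) (f g : ν → ν) :
    (d.modify k d0 f).modify k d0 g = d.modify k d0 (fun v => g (f v)) := by
  show (d.insert k (f (d.getD k d0))).insert k (g ((d.insert k (f (d.getD k d0))).getD k d0)) = _
  rw [PySem.Dict.getD_insert_self, PySem.Dict.insert_insert_self]; rfl

theorem pv_modify_congr {κ ν : Type} [BEq κ] (d : PySem.Dict κ ν) (k : κ) (d0 : ν) {f g : ν → ν}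
    (h : f (d.getD k d0) = g (d.getD k d0)) : d.modify k d0 f = d.modify k d0 g := by
  show d.insert k (f (d.getD k d0)) = d.insert k (g (d.getD k d0))
  rw [h]

theorem pv_insert_modify {κ ν : Type} [BEq κ] [LawfulBEq κ] (d : PySem.Dict κ ν) (k : κ) (d0 : ν) (f : ν → ν)
    (hc : d.contains k = false) : (d.insert k d0).modify k d0 f = d.modify k d0 f := by
  show (d.insert k d0).insert k (f ((d.insert k d0).getD k d0)) = d.insert k (f (d.getD k d0))
  rw [PySem.Dict.getD_insert_self, PySem.Dict.insert_insert_self, PySem.Dict.getD_of_not_contains d d0 hc]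

-- the accumulator invariant: keys are unique at every level
def PvInv2 (dc : PvD2) : Prop := dc.keys.Nodup ∧ ∀ ds ∈ dc.values, ds.keys.Nodup
def PvInv3 (t : PvD3) : Prop := t.keys.Nodup ∧ ∀ dc ∈ t.values, PvInv2 dc

theorem pv_getD_values {κ ν : Type} [BEq κ] [LawfulBEq κ] (d : PySem.Dict κ ν) (k : κ) (d0 : ν) :
    d.getD k d0 ∈ d.values ∨ d.getD k d0 = d0 := by
  by_cases hc : d.contains k = true
  · have hsome : (d.get? k).isSome = true := by rw [← PySem.Dict.contains_eq_isSome_get?]; exact hc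
    obtain ⟨v, hv⟩ := Option.isSome_iff_exists.mp hsome
    left
    rw [PySem.Dict.getD_of_get?_eq_some d d0 hv]
    have := PySem.Dict.mem_items_of_get?_eq_some d hv
    simp only [PySem.Dict.values]
    exact List.mem_map.mpr ⟨(k, v), this, rfl⟩
  · right; exact PySem.Dict.getD_of_not_contains d d0 (by simpa using hc)

theorem pv_inv2_empty : PvInv2 PySem.Dict.empty := by
  refine ⟨List.nodup_nil, ?_⟩
  intro ds hds
  exact absurd hds List.not_mem_nil

theorem pv_inv2_getD (dc : PvD2) (h : PvInv2 dc) (s : String) :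
    (dc.getD s PySem.Dict.empty).keys.Nodup := by
  rcases pv_getD_values dc s PySem.Dict.empty with hm | he
  · exact h.2 _ hm
  · rw [he]; exact List.nodup_nil

theorem pv_inv3_getD (t : PvD3) (h : PvInv3 t) (c : String) :
    PvInv2 (t.getD c PySem.Dict.empty) := by
  rcases pv_getD_values t c PySem.Dict.empty with hm | he
  · exact h.2 _ hm
  · rw [he]; exact pv_inv2_empty

theorem pv_inv2_modify (dc : PvD2) (h : PvInv2 dc) (s : String) (G : PvD1 → PvD1)
    (hG : ∀ ds, ds.keys.Nodup → (G ds).keys.Nodup) : PvInv2 (dc.modify s PySem.Dict.empty G) := by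
  have heq : dc.modify s PySem.Dict.empty G = dc.insert s (G (dc.getD s PySem.Dict.empty)) := rfl
  constructor
  · rw [heq]; exact PySem.Dict.nodup_keys_insert _ _ _ h.1
  · intro ds hds
    rw [heq] at hds
    rcases PySem.Dict.mem_values_insert _ _ _ _ hds with hE | hm
    · rw [hE]; exact hG _ (pv_inv2_getD dc h s)
    · exact h.2 _ hm

theorem pv_inv3_modify (t : PvD3) (h : PvInv3 t) (c : String) (F : PvD2 → PvD2)
    (hF : ∀ dc, PvInv2 dc → PvInv2 (F dc)) : PvInv3 (t.modify c PySem.Dict.empty F) := by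
  have heq : t.modify c PySem.Dict.empty F = t.insert c (F (t.getD c PySem.Dict.empty)) := rfl
  constructor
  · rw [heq]; exact PySem.Dict.nodup_keys_insert _ _ _ h.1
  · intro dc hdc
    rw [heq] at hdc
    rcases PySem.Dict.mem_values_insert _ _ _ _ hdc with hE | hm
    · rw [hE]; exact hF _ (pv_inv3_getD t h c)
    · exact h.2 _ hm

theorem pv_nodup_bMerge1 (src : List (String × List Int)) (ds : PvD1) (h : ds.keys.Nodup) :
    (bMerge1 ds src).keys.Nodup := by
  induction src generalizing ds with
  | nil => exact h
  | cons p rest ih =>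
      exact ih _ (PySem.Dict.nodup_keys_insert _ _ _ h)

theorem pv_inv2_bMerge2 (src : List (String × List (String × List Int))) (dc : PvD2) (h : PvInv2 dc) :
    PvInv2 (bMerge2 dc src) := by
  induction src generalizing dc with
  | nil => exact h
  | cons p rest ih =>
      exact ih _ (pv_inv2_modify dc h p.1 _ (fun ds hn => pv_nodup_bMerge1 p.2 ds hn))

theorem pv_inv3_bMerge3 (src : List (String × List (String × List (String × List Int)))) (t : PvD3) (h : PvInv3 t) :
    PvInv3 (bMerge3 t src) := by
  induction src generalizing t with
  | nil => exact h
  | cons p rest ih =>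
      exact ih _ (pv_inv3_modify t h p.1 _ (fun dc hI => pv_inv2_bMerge2 p.2 dc hI))

-- A's innermost body is a single nested modify
theorem pv_step3_eq (c s : String) (t : PvD3) (p : String × List Int) :
    aStep3 c s t p =
      t.modify c PySem.Dict.empty (fun dc => dc.modify s PySem.Dict.empty (fun ds => ds.modify p.1 [] (· ++ p.2))) := by
  unfold aStep3
  by_cases hcond : ((t.getD c PySem.Dict.empty).getD s PySem.Dict.empty).contains p.1 = false
  · simp only [if_pos hcond]
    rw [pv_modify_modify]
    apply pv_modify_congr
    rw [pv_modify_modify]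
    apply pv_modify_congr
    exact pv_insert_modify _ _ _ _ hcond
  · simp only [if_neg hcond]

-- invariant facts used at each level when the ensure-branch inserted an empty dict
theorem pv_inv2_insert_empty (dc : PvD2) (h : PvInv2 dc) (k : String) :
    PvInv2 (dc.insert k PySem.Dict.empty) := by
  refine ⟨PySem.Dict.nodup_keys_insert _ _ _ h.1, ?_⟩
  intro ds hds
  rcases PySem.Dict.mem_values_insert _ _ _ _ hds with hE | hm
  · rw [hE]; exact List.nodup_nil
  · exact h.2 _ hm

theorem pv_L3 (c s : String) (src : List (String × List Int)) (t : PvD3)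
    (hc : t.contains c = true) (hs : (t.getD c PySem.Dict.empty).contains s = true) (hI : PvInv3 t) :
    src.foldl (aStep3 c s) t =
      t.modify c PySem.Dict.empty (fun dc => dc.modify s PySem.Dict.empty (fun ds => bMerge1 ds src)) := by
  induction src generalizing t with
  | nil =>
      symm
      calc t.modify c PySem.Dict.empty (fun dc => dc.modify s PySem.Dict.empty (fun ds => ds))
          = t.modify c PySem.Dict.empty (fun dc => dc) := by
            apply pv_modify_congr
            exact pv_dict_modify_id _ _ _ hs (pv_inv3_getD t hI c).1
        _ = t := pv_dict_modify_id _ _ _ hc hI.1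
  | cons p rest ih =>
      rw [List.foldl_cons, pv_step3_eq]
      rw [ih (t.modify c PySem.Dict.empty fun dc =>
            PySem.Dict.modify dc s PySem.Dict.empty fun ds => PySem.Dict.modify ds p.1 [] fun x => x ++ p.2)
        (by rw [PySem.Dict.contains_modify]; simp)
        (by rw [PySem.Dict.getD_modify_self, PySem.Dict.contains_modify]; simp [hs])
        (pv_inv3_modify t hI c _ (fun dc hdc =>
          pv_inv2_modify dc hdc s _ (fun ds hn => PySem.Dict.nodup_keys_insert _ _ _ hn)))]
      rw [pv_modify_modify]
      apply pv_modify_congr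
      rw [pv_modify_modify]
      rfl

-- A's middle-loop body equals B's merge of one sub/dub entry
theorem pv_step2_eq (c : String) (t : PvD3) (p : String × List (String × List Int))
    (hc : t.contains c = true) (hI : PvInv3 t) :
    aStep2 c t p =
      t.modify c PySem.Dict.empty (fun dc => dc.modify p.1 PySem.Dict.empty (fun ds => bMerge1 ds p.2)) := by
  unfold aStep2
  by_cases hcond : (t.getD c PySem.Dict.empty).contains p.1 = false
  · simp only [if_pos hcond]
    rw [pv_L3 c p.1 p.2 (t.modify c PySem.Dict.empty fun dc => PySem.Dict.insert dc p.1 PySem.Dict.empty)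
        (by rw [PySem.Dict.contains_modify]; simp)
        (by rw [PySem.Dict.getD_modify_self, PySem.Dict.contains_insert]; simp)
        (pv_inv3_modify t hI c _ (fun dc hdc => pv_inv2_insert_empty dc hdc p.1))]
    rw [pv_modify_modify]
    apply pv_modify_congr
    exact pv_insert_modify _ _ _ _ hcond
  · simp only [if_neg hcond]
    exact pv_L3 c p.1 p.2 t hc (by simpa using hcond) hI

theorem pv_L2 (c : String) (src : List (String × List (String × List Int))) (t : PvD3)
    (hc : t.contains c = true) (hI : PvInv3 t) :
    src.foldl (aStep2 c) t = t.modify c PySem.Dict.empty (fun dc => bMerge2 dc src) := by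
  induction src generalizing t with
  | nil => exact (pv_dict_modify_id _ _ _ hc hI.1).symm
  | cons p rest ih =>
      rw [List.foldl_cons, pv_step2_eq c t p hc hI]
      rw [ih (t.modify c PySem.Dict.empty fun dc =>
            PySem.Dict.modify dc p.1 PySem.Dict.empty fun ds => bMerge1 ds p.2)
        (by rw [PySem.Dict.contains_modify]; simp)
        (pv_inv3_modify t hI c _ (fun dc hdc =>
          pv_inv2_modify dc hdc p.1 _ (fun ds hn => pv_nodup_bMerge1 p.2 ds hn)))]
      rw [pv_modify_modify]
      rfl

-- A's outer-loop body equals B's merge of one country entry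
theorem pv_step1_eq (t : PvD3) (p : String × List (String × List (String × List Int)))
    (hI : PvInv3 t) :
    aStep1 t p = t.modify p.1 PySem.Dict.empty (fun dc => bMerge2 dc p.2) := by
  unfold aStep1
  by_cases hcond : t.contains p.1 = false
  · simp only [if_pos hcond]
    have hIi : PvInv3 (t.insert p.1 PySem.Dict.empty) := by
      refine ⟨PySem.Dict.nodup_keys_insert _ _ _ hI.1, ?_⟩
      intro dc hdc
      rcases PySem.Dict.mem_values_insert _ _ _ _ hdc with hE | hm
      · rw [hE]; exact pv_inv2_empty
      · exact hI.2 _ hm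
    rw [pv_L2 p.1 p.2 (t.insert p.1 PySem.Dict.empty) (by rw [PySem.Dict.contains_insert]; simp) hIi]
    exact pv_insert_modify _ _ _ _ hcond
  · simp only [if_neg hcond]
    exact pv_L2 p.1 p.2 t (by simpa using hcond) hI

theorem pv_L1 (src : List (String × List (String × List (String × List Int)))) (t : PvD3)
    (hI : PvInv3 t) : src.foldl aStep1 t = bMerge3 t src := by
  induction src generalizing t with
  | nil => rfl
  | cons p rest ih =>
      rw [List.foldl_cons, pv_step1_eq t p hI]
      exact ih _ (pv_inv3_modify t hI p.1 _ (fun dc hdc => pv_inv2_bMerge2 p.2 dc hdc))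

theorem pv_inv3_empty : PvInv3 PySem.Dict.empty := by
  refine ⟨List.nodup_nil, ?_⟩
  intro dc hdc
  exact absurd hdc List.not_mem_nil

theorem pv_top (rds : List (List (String × List (String × List (String × List Int))))) (t : PvD3)
    (hI : PvInv3 t) :
    rds.foldl (fun t rd => rd.foldl aStep1 t) t = rds.foldl bMerge3 t := by
  induction rds generalizing t with
  | nil => rfl
  | cons rd rest ih =>
      rw [List.foldl_cons, List.foldl_cons, pv_L1 rd t hI]
      exact ih _ (pv_inv3_bMerge3 rd t hI)

-- ===== VERDICT (by name: the statement is the Claim_ definition above) =====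
theorem format_by_country_spec : Claim_equal_format_by_country := by
  intro all_results _
  show format_by_country all_results = format_by_country_alt all_results
  unfold format_by_country format_by_country_alt
  rw [pv_top all_results PySem.Dict.empty pv_inv3_empty]
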